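-- pv_equiv track=rewrite | github.com/RicardoBittencourt77/atividades-de-TAREFAS-MACANTES | isPhoneNumber.py | is0800PhoneNumberBR
-- ===== SOURCE A (Python) =====
-- def is0800PhoneNumberBR(text):
--     if len(text) != 13:
--         return False
--     for i in range(0, 4):
--         if not text[i].isdecimal():
--             return False
--     if text[4] != ' ':
--         return False
--     for i in range(5, 8):
--         if not text[i].isdecimal():
--             return False
--     if text[8] != ' ':
--         return False
--     for i in range(9, 13):
--         if not text[i].isdecimal():
--             return False
--     return True
-- ===== SOURCE B (Python) =====
-- def is0800PhoneNumberBR(text):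
--     parts = text.split(' ')
--     if len(parts) != 3:
--         return False
--     a, b, c = parts
--     if len(a) != 4 or len(b) != 3 or len(c) != 4:
--         return False
--     return a.isdecimal() and b.isdecimal() and c.isdecimal()
-- ===== Notes on version B (the rewrite author's own statement) =====
-- stated objective: idiomatic
-- what changed: Replaced the indexed per-character loops with explicit position checks by split-on-space tokenization into three segments validated whole (len 4/3/4 and isdecimal), total length 13 enforced implicitly.
import Mathlib
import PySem

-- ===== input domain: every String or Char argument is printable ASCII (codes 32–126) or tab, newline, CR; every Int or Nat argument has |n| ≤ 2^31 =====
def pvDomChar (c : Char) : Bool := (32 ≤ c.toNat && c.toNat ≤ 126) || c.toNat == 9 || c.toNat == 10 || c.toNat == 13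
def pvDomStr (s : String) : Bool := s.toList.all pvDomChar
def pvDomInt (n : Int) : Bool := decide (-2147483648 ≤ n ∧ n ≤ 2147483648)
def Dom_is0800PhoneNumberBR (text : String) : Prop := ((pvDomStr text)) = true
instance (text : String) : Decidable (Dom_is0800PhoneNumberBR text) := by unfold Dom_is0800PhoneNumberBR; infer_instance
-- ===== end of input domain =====

-- B replaces A's indexed per-character loops by split-on-space tokenization with whole-segment
-- length/decimal checks (objective: idiomatic; same behaviour, same asymptotic cost).
-- 'isdecimal' is ported as PySem.Chars.isdigit / strIsdigit, exact on the ASCII domain.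

-- ===== PORT A =====
def is0800PhoneNumberBR (text : String) : Bool :=
  if PySem.Str.len text ≠ 13 then false
  else if ¬ ((PySem.List.pyRange 0 4 1).all
      (fun i => (PySem.Str.pyGet? text i).any PySem.Chars.isdigit)) then false
  else if PySem.Str.pyGet? text 4 ≠ some ' ' then false
  else if ¬ ((PySem.List.pyRange 5 8 1).all
      (fun i => (PySem.Str.pyGet? text i).any PySem.Chars.isdigit)) then false
  else if PySem.Str.pyGet? text 8 ≠ some ' ' then false
  else if ¬ ((PySem.List.pyRange 9 13 1).all
      (fun i => (PySem.Str.pyGet? text i).any PySem.Chars.isdigit)) then false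
  else true

-- ===== PORT B =====
def is0800PhoneNumberBR_alt (text : String) : Bool :=
  match PySem.Str.split? text " " with
  | some [a, b, c] =>
    if PySem.Str.len a ≠ 4 ∨ PySem.Str.len b ≠ 3 ∨ PySem.Str.len c ≠ 4 then false
    else PySem.Str.strIsdigit a && PySem.Str.strIsdigit b && PySem.Str.strIsdigit c
  | _ => false

-- ===== PRECONDITION & SPEC =====
def Spec_is0800PhoneNumberBR (text : String) (out : Bool) : Prop := out = is0800PhoneNumberBR_alt text
instance (text : String) (out : Bool) : Decidable (Spec_is0800PhoneNumberBR text out) := by unfold Spec_is0800PhoneNumberBR; infer_instance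

-- ===== CLAIM (what is proved, stated in full; the proofs are below) =====
def Claim_equal_is0800PhoneNumberBR : Prop := ∀ (text : String), Dom_is0800PhoneNumberBR text → Spec_is0800PhoneNumberBR text (is0800PhoneNumberBR text)

-- ===== LEMMAS AND PROOFS =====

-- Reference recursion for Python's str.split(' '): parts accumulated in reverse in `cur`.
def pvSplitSp : List Char → List Char → List (List Char)
  | [], cur => [cur.reverse]
  | c :: rest, cur => if c = ' ' then cur.reverse :: pvSplitSp rest [] else pvSplitSp rest (c :: cur)

-- Join with single spaces (inverse of pvSplitSp).
def pvJoinSp : List (List Char) → List Char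
  | [] => []
  | [p] => p
  | p :: ps => p ++ ' ' :: pvJoinSp ps

theorem pvSplitSp_ne_nil (l cur : List Char) : pvSplitSp l cur ≠ [] := by
  induction l generalizing cur with
  | nil => simp [pvSplitSp]
  | cons c rest ih =>
    simp only [pvSplitSp]
    split_ifs <;> simp [ih]

theorem pv_go_eq (l : List Char) : ∀ (fuel : Nat) (cur : List Char) (acc : List (List Char))
    (_hf : l.length ≤ fuel),
    PySem.Chars.splitOn.go [' '] fuel l cur acc = acc.reverse ++ pvSplitSp l cur := by
  induction l with
  | nil =>
    intro fuel cur acc _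
    cases fuel <;> simp [PySem.Chars.splitOn.go, pvSplitSp]
  | cons c rest ih =>
    intro fuel cur acc hf
    cases fuel with
    | zero => simp at hf
    | succ f =>
      simp only [PySem.Chars.splitOn.go]
      by_cases hc : c = ' '
      · subst hc
        have hpre : [' '].isPrefixOf (' ' :: rest) = true := by simp [List.isPrefixOf]
        rw [if_pos hpre]
        have hdrop : List.drop [' '].length (' ' :: rest) = rest := rfl
        rw [hdrop, ih f [] (List.reverse cur :: acc)
          (by simp only [List.length_cons] at hf; omega)]
        simp [pvSplitSp]
      · have hpre : [' '].isPrefixOf (c :: rest) = false := by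
          simp [List.isPrefixOf]; exact fun h => (hc h.symm).elim
        rw [if_neg (by simp [hpre])]
        simp only [List.length_cons] at hf
        rw [ih f (c :: cur) acc (by omega)]
        simp [pvSplitSp, hc]

theorem pv_splitOn_space (l : List Char) : PySem.Chars.splitOn l [' '] = pvSplitSp l [] := by
  have := pv_go_eq l (l.length + 1) [] [] (by omega)
  simpa [PySem.Chars.splitOn] using this

theorem pvJoinSp_cons (p : List Char) (ps : List (List Char)) (h : ps ≠ []) :
    pvJoinSp (p :: ps) = p ++ ' ' :: pvJoinSp ps := by
  cases ps with
  | nil => exact absurd rfl h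
  | cons q qs => rfl

theorem pv_join_splitSp (l : List Char) : ∀ cur, pvJoinSp (pvSplitSp l cur) = cur.reverse ++ l := by
  induction l with
  | nil => intro cur; simp [pvSplitSp, pvJoinSp]
  | cons c rest ih =>
    intro cur
    simp only [pvSplitSp]
    by_cases hc : c = ' '
    · subst hc
      rw [if_pos rfl, pvJoinSp_cons _ _ (pvSplitSp_ne_nil rest []), ih []]
      simp
    · rw [if_neg hc, ih (c :: cur)]
      simp

theorem pv_digit_ne_space {c : Char} (h : PySem.Chars.isdigit c = true) : ¬ (c = ' ') := by
  intro hc; subst hc; simp [PySem.Chars.isdigit] at h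

-- Core versions over List Char.
def pvAcore (l : List Char) : Bool :=
  if (l.length : Int) ≠ 13 then false
  else if ¬ (([0, 1, 2, 3] : List Int).all
      (fun i => (PySem.List.pyGet? l i).any PySem.Chars.isdigit)) then false
  else if PySem.List.pyGet? l 4 ≠ some ' ' then false
  else if ¬ (([5, 6, 7] : List Int).all
      (fun i => (PySem.List.pyGet? l i).any PySem.Chars.isdigit)) then false
  else if PySem.List.pyGet? l 8 ≠ some ' ' then false
  else if ¬ (([9, 10, 11, 12] : List Int).all
      (fun i => (PySem.List.pyGet? l i).any PySem.Chars.isdigit)) then false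
  else true

def pvBcore (l : List Char) : Bool :=
  match pvSplitSp l [] with
  | [a, b, c] =>
    if (a.length : Int) ≠ 4 ∨ (b.length : Int) ≠ 3 ∨ (c.length : Int) ≠ 4 then false
    else PySem.Chars.strIsdigit a && PySem.Chars.strIsdigit b && PySem.Chars.strIsdigit c
  | _ => false

theorem pvA_eq_core (text : String) : is0800PhoneNumberBR text = pvAcore text.toList := by
  have h1 : PySem.List.pyRange 0 4 1 = ([0,1,2,3] : List Int) := by decide
  have h2 : PySem.List.pyRange 5 8 1 = ([5,6,7] : List Int) := by decide
  have h3 : PySem.List.pyRange 9 13 1 = ([9,10,11,12] : List Int) := by decide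
  simp only [is0800PhoneNumberBR, pvAcore, h1, h2, h3, PySem.Str.len_eq, PySem.Str.pyGet?_eq,
    PySem.Chars.pyGet?_eq_listPyGet?]

theorem pvB_eq_core (text : String) : is0800PhoneNumberBR_alt text = pvBcore text.toList := by
  have hsp : PySem.Str.split? text " " =
      some (List.map String.ofList (pvSplitSp text.toList [])) := by
    simp [PySem.Str.split?, PySem.Chars.split?, pv_splitOn_space, show (" ").toList = [' '] from rfl]
  simp only [is0800PhoneNumberBR_alt, pvBcore, hsp]
  rcases pvSplitSp text.toList [] with _ | ⟨a, _ | ⟨b, _ | ⟨c, _ | ⟨d, ps⟩⟩⟩⟩ <;>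
    simp [PySem.Str.len_eq, PySem.Str.strIsdigit_eq]

theorem pv_core_eq (l : List Char) : pvAcore l = pvBcore l := by
  by_cases h13 : l.length = 13
  · -- destruct l into its 13 characters
    rcases l with _ | ⟨c0, _ | ⟨c1, _ | ⟨c2, _ | ⟨c3, _ | ⟨c4, _ | ⟨c5, _ | ⟨c6, _ | ⟨c7,
      _ | ⟨c8, _ | ⟨c9, _ | ⟨c10, _ | ⟨c11, _ | ⟨c12, tl⟩⟩⟩⟩⟩⟩⟩⟩⟩⟩⟩⟩⟩ <;>
      simp only [List.length_cons, List.length_nil] at h13 <;> try omega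
    have htl : tl = [] := by
      have : tl.length = 0 := by omega
      exact List.eq_nil_of_length_eq_zero this
    subst htl
    rw [Bool.eq_iff_iff]
    constructor
    · intro hA
      simp only [pvAcore, List.all_cons, List.all_nil, PySem.List.pyGet?,
        PySem.List.pyIdx?] at hA
      norm_num at hA
      obtain ⟨⟨d0, d1, d2, d3⟩, s4, ⟨d5, d6, d7⟩, s8, d9, d10, d11, d12⟩ := hA
      -- re-type the indexed facts at their definitional values
      have d2 : PySem.Chars.isdigit c2 = true := d2
      have d3 : PySem.Chars.isdigit c3 = true := d3
      have s4 : c4 = ' ' := s4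
      have d5 : PySem.Chars.isdigit c5 = true := d5
      have d6 : PySem.Chars.isdigit c6 = true := d6
      have d7 : PySem.Chars.isdigit c7 = true := d7
      have s8 : c8 = ' ' := s8
      have d9 : PySem.Chars.isdigit c9 = true := d9
      have d10 : PySem.Chars.isdigit c10 = true := d10
      have d11 : PySem.Chars.isdigit c11 = true := d11
      have d12 : PySem.Chars.isdigit c12 = true := d12
      have hsp : pvSplitSp [c0,c1,c2,c3,c4,c5,c6,c7,c8,c9,c10,c11,c12] [] =
          [[c0,c1,c2,c3], [c5,c6,c7], [c9,c10,c11,c12]] := by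
        simp only [pvSplitSp, if_neg (pv_digit_ne_space d0), if_neg (pv_digit_ne_space d1),
          if_neg (pv_digit_ne_space d2), if_neg (pv_digit_ne_space d3), if_pos s4,
          if_neg (pv_digit_ne_space d5), if_neg (pv_digit_ne_space d6),
          if_neg (pv_digit_ne_space d7), if_pos s8, if_neg (pv_digit_ne_space d9),
          if_neg (pv_digit_ne_space d10), if_neg (pv_digit_ne_space d11),
          if_neg (pv_digit_ne_space d12)]
        simp
      simp [pvBcore, hsp, PySem.Chars.strIsdigit, d0, d1, d2, d3, d5, d6, d7, d9, d10, d11, d12]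
    · intro hB
      simp only [pvBcore] at hB
      generalize hsp : pvSplitSp [c0,c1,c2,c3,c4,c5,c6,c7,c8,c9,c10,c11,c12] [] = parts at hB
      rcases parts with _ | ⟨a, _ | ⟨b, _ | ⟨c, _ | ⟨d, ps⟩⟩⟩⟩ <;> simp at hB
      obtain ⟨⟨ha4, hb3, hc4⟩, hB⟩ := hB
      have hjoin := pv_join_splitSp [c0,c1,c2,c3,c4,c5,c6,c7,c8,c9,c10,c11,c12] []
      rw [hsp] at hjoin
      rw [pvJoinSp_cons _ _ (by simp), pvJoinSp_cons _ _ (by simp)] at hjoin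
      simp only [pvJoinSp, List.reverse_nil, List.nil_append] at hjoin
      -- destruct a, b, c by their lengths
      rcases a with _ | ⟨a0, _ | ⟨a1, _ | ⟨a2, _ | ⟨a3, ta⟩⟩⟩⟩ <;>
        simp only [List.length_cons, List.length_nil] at ha4 <;> try omega
      have : ta = [] := List.eq_nil_of_length_eq_zero (by omega)
      subst this
      rcases b with _ | ⟨b0, _ | ⟨b1, _ | ⟨b2, tb⟩⟩⟩ <;>
        simp only [List.length_cons, List.length_nil] at hb3 <;> try omega
      have : tb = [] := List.eq_nil_of_length_eq_zero (by omega)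
      subst this
      rcases c with _ | ⟨e0, _ | ⟨e1, _ | ⟨e2, _ | ⟨e3, tc⟩⟩⟩⟩ <;>
        simp only [List.length_cons, List.length_nil] at hc4 <;> try omega
      have : tc = [] := List.eq_nil_of_length_eq_zero (by omega)
      subst this
      simp only [List.cons_append, List.nil_append, List.cons.injEq] at hjoin
      obtain ⟨h0, h1, h2, h3, h4, h5, h6, h7, h8, h9, h10, h11, h12, -⟩ := hjoin
      simp only [PySem.Chars.strIsdigit, List.all_cons, List.all_nil] at hB
      subst h0 h1 h2 h3 h4 h5 h6 h7 h8 h9 h10 h11 h12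
      simp_all [pvAcore, PySem.List.pyGet?, PySem.List.pyIdx?]
  · rw [Bool.eq_iff_iff]
    constructor
    · intro hA
      by_cases hL : (l.length : Int) = 13
      · exact absurd (show l.length = 13 by exact_mod_cast hL) h13
      · simp [pvAcore, hL] at hA
    · intro hB
      exfalso
      simp only [pvBcore] at hB
      generalize hsp : pvSplitSp l [] = parts at hB
      rcases parts with _ | ⟨a, _ | ⟨b, _ | ⟨c, _ | ⟨d, ps⟩⟩⟩⟩ <;> simp at hB
      obtain ⟨⟨ha4, hb3, hc4⟩, hB⟩ := hB
      have hjoin := pv_join_splitSp l []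
      rw [hsp, pvJoinSp_cons _ _ (by simp), pvJoinSp_cons _ _ (by simp)] at hjoin
      simp only [pvJoinSp, List.reverse_nil, List.nil_append] at hjoin
      apply h13
      rw [← hjoin]
      simp only [List.length_append, List.length_cons]
      omega

-- ===== VERDICT (by name: the statement is the Claim_ definition above) =====
theorem is0800PhoneNumberBR_spec : Claim_equal_is0800PhoneNumberBR := by
  intro text _
  unfold Spec_is0800PhoneNumberBR
  rw [pvA_eq_core, pvB_eq_core, pv_core_eq]
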